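-- pv_equiv track=rewrite | github.com/M-Mueller/mattermost-poll | app.py | parse_slash_command
-- ===== SOURCE A (Python) =====
-- from collections import namedtuple
--
-- def parse_slash_command(command):
--     """Parses a slash command for supported arguments.
--     Receives the form data of the request and returns all found arguments.
--     Arguments are separated by '--'.
--     Supported arguments:
--         - message: str
--         - vote_options: list of str
--         - secret: boolean
--         - public: boolean
--         - num_votes: int
--     """
--     args = [arg.strip() for arg in command.split('--')]
--     secret = False
--     public = False
--     max_votes = 1
--     try:
--         i = [a for a in args].index('secret')
--         args.pop(i)
--         secret = True
--     except:
--         pass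
--
--     try:
--         i = [a for a in args].index('public')
--         args.pop(i)
--         public = True
--     except:
--         pass
--
--     try:
--         votes = [a for a in enumerate(args) if 'votes' in a[1].lower()]
--         if len(votes) > 0:
--             args.pop(votes[0][0])
--             max_votes = int(votes[0][1].split('=')[1])
--             max_votes = max(1, max_votes)
--     except:
--         pass
--
--     Arguments = namedtuple('Arguments', ['message', 'vote_options',
--                                          'secret', 'public', 'max_votes'])
--     if args:
--         return Arguments(args[0], args[1:], secret, public, max_votes)
--     else:
--         return Arguments('', [], secret, public, max_votes)
-- ===== SOURCE B (Python) =====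
-- from collections import namedtuple
--
-- Arguments = namedtuple('Arguments', ['message', 'vote_options',
--                                      'secret', 'public', 'max_votes'])
--
-- def parse_slash_command(command):
--     """One pass over the stripped tokens with three 'not yet taken' flags
--     instead of three separate index/pop scans."""
--     secret = False
--     public = False
--     votes_taken = False
--     max_votes = 1
--     remaining = []
--     for tok in (t.strip() for t in command.split('--')):
--         if not secret and tok == 'secret':
--             secret = True
--         elif not public and tok == 'public':
--             public = True
--         elif not votes_taken and 'votes' in tok.lower():
--             votes_taken = True
--             try:
--                 max_votes = max(1, int(tok.split('=')[1]))
--             except (IndexError, ValueError):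
--                 pass
--         else:
--             remaining.append(tok)
--     if remaining:
--         return Arguments(remaining[0], remaining[1:], secret, public, max_votes)
--     return Arguments('', [], secret, public, max_votes)
-- ===== Notes on version B (the rewrite author's own statement) =====
-- stated objective: simpler
-- what changed: B replaces A's three separate index/pop scans (with try/except around each) by a single pass over the stripped tokens that consumes the first 'secret', the first 'public' and the first votes-like token via three not-yet-taken flags, collecting all other tokens into the result list.
import Mathlib
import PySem

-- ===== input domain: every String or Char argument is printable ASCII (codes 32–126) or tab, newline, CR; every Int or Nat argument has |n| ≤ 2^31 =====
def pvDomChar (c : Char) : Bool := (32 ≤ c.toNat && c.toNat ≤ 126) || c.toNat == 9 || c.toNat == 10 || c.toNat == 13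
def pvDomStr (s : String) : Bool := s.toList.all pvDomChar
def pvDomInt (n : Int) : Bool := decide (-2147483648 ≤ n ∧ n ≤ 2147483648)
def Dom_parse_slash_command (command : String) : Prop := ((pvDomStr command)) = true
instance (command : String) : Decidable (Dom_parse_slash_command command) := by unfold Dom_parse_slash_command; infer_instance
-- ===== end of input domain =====

-- B replaces A's three separate index/pop scans by a single pass over the stripped
-- tokens with three 'not yet taken' flags; same return value, simpler decomposition.

-- ===== PORT A =====
def parse_slash_command (command : String) : String × List String × Bool × Bool × Int :=
  let args := ((PySem.Str.split? command "--").getD []).map PySem.Str.strip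
  -- try: i = args.index('secret'); args.pop(i); secret = True  except: pass
  let sres : List String × Bool :=
    match PySem.List.index? args "secret" with
    | some i =>
        (match PySem.List.pop? args (i : Int) with
         | some r => r.2
         | none => args, true)
    | none => (args, false)
  let args := sres.1
  let secret := sres.2
  -- try: i = args.index('public'); args.pop(i); public = True  except: pass
  let pres : List String × Bool :=
    match PySem.List.index? args "public" with
    | some i =>
        (match PySem.List.pop? args (i : Int) with
         | some r => r.2
         | none => args, true)
    | none => (args, false)
  let args := pres.1
  let pub := pres.2
  -- votes = [a for a in enumerate(args) if 'votes' in a[1].lower()]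
  let votes := (PySem.List.enumerate args).filter
      (fun a => PySem.Str.isIn "votes" (PySem.Str.lower a.2))
  let vres : List String × Int :=
    match votes.head? with
    | some v =>
        let args' := match PySem.List.pop? args v.1 with
          | some r => r.2
          | none => args
        -- max_votes = int(votes[0][1].split('=')[1]); max_votes = max(1, max_votes)
        -- (an exception leaves max_votes = 1, but args was already popped)
        match PySem.List.pyGet? ((PySem.Str.split? v.2 "=").getD []) 1 with
        | some x =>
          (match PySem.Int.ofStr? x with
           | some n => (args', max 1 n)
           | none => (args', 1))
        | none => (args', 1)
    | none => (args, 1)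
  let args := vres.1
  let max_votes := vres.2
  match args with
  | a :: rest => (a, rest, secret, pub, max_votes)
  | [] => ("", [], secret, pub, max_votes)

-- ===== PORT B =====
-- try: max_votes = max(1, int(tok.split('=')[1])) except: pass  (m = current max_votes)
def pvParseVotes (tok : String) (m : Int) : Int :=
  match PySem.List.pyGet? ((PySem.Str.split? tok "=").getD []) 1 with
  | some x =>
    match PySem.Int.ofStr? x with
    | some n => max 1 n
    | none => m
  | none => m

-- one iteration of B's loop; state = (secret, public, votes_taken, max_votes, remaining)
def pvStepB (st : Bool × Bool × Bool × Int × List String) (tok : String) :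
    Bool × Bool × Bool × Int × List String :=
  if !st.1 && tok == "secret" then (true, st.2.1, st.2.2.1, st.2.2.2.1, st.2.2.2.2)
  else if !st.2.1 && tok == "public" then (st.1, true, st.2.2.1, st.2.2.2.1, st.2.2.2.2)
  else if !st.2.2.1 && PySem.Str.isIn "votes" (PySem.Str.lower tok) then
    (st.1, st.2.1, true, pvParseVotes tok st.2.2.2.1, st.2.2.2.2)
  else (st.1, st.2.1, st.2.2.1, st.2.2.2.1, st.2.2.2.2 ++ [tok])

def parse_slash_command_alt (command : String) : String × List String × Bool × Bool × Int :=
  let toks := ((PySem.Str.split? command "--").getD []).map PySem.Str.strip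
  let st := toks.foldl pvStepB (false, false, false, 1, [])
  match st.2.2.2.2 with
  | a :: rest => (a, rest, st.1, st.2.1, st.2.2.2.1)
  | [] => ("", [], st.1, st.2.1, st.2.2.2.1)

-- ===== PRECONDITION & SPEC =====
def Spec_parse_slash_command (command : String) (out : String × List String × Bool × Bool × Int) : Prop := out = parse_slash_command_alt command
instance (command : String) (out : String × List String × Bool × Bool × Int) : Decidable (Spec_parse_slash_command command out) := by unfold Spec_parse_slash_command; infer_instance

-- ===== CLAIM (what is proved, stated in full; the proofs are below) =====
def Claim_equal_parse_slash_command : Prop := ∀ (command : String), Dom_parse_slash_command command → Spec_parse_slash_command command (parse_slash_command command)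

-- ===== LEMMAS AND PROOFS =====

-- proof-only recursion: scan the token list once, flags s/p/v = already taken;
-- returns (remaining tokens, secret found, public found, votes token found)
def pvScan : List String → Bool → Bool → Bool → List String × Bool × Bool × Option String
  | [], _, _, _ => ([], false, false, none)
  | t :: ts, s, p, v =>
    if !s && t == "secret" then
      let r := pvScan ts true p v; (r.1, true, r.2.2.1, r.2.2.2)
    else if !p && t == "public" then
      let r := pvScan ts s true v; (r.1, r.2.1, true, r.2.2.2)
    else if !v && PySem.Str.isIn "votes" (PySem.Str.lower t) then
      let r := pvScan ts s p true; (r.1, r.2.1, r.2.2.1, some t)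
    else
      let r := pvScan ts s p v; (t :: r.1, r.2.1, r.2.2.1, r.2.2.2)

-- first votes-like token with its index (proof-only)
def pvFirstV : List String → Option (Nat × String)
  | [] => none
  | t :: ts =>
    if PySem.Str.isIn "votes" (PySem.Str.lower t) then some (0, t)
    else (pvFirstV ts).map (fun q => (q.1 + 1, q.2))
lemma pvScan_s_true : ∀ (ts : List String) (p v : Bool), (pvScan ts true p v).2.1 = false := by
  intro ts
  induction ts with
  | nil => intro p v; simp [pvScan]
  | cons t ts ih =>
    intro p v; simp only [pvScan]
    split_ifs with h1 h2 h3
    · simp at h1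
    · simpa using ih _ _
    · simpa using ih _ _
    · simpa using ih _ _
lemma pvScan_p_true : ∀ (ts : List String) (s v : Bool), (pvScan ts s true v).2.2.1 = false := by
  intro ts
  induction ts with
  | nil => intro s v; simp [pvScan]
  | cons t ts ih =>
    intro s v; simp only [pvScan]
    split_ifs with h1 h2 h3
    · simpa using ih _ _
    · simp at h2
    · simpa using ih _ _
    · simpa using ih _ _
lemma pvScan_v_true : ∀ (ts : List String) (s p : Bool), (pvScan ts s p true).2.2.2 = none := by
  intro ts
  induction ts with
  | nil => intro s p; simp [pvScan]
  | cons t ts ih =>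
    intro s p; simp only [pvScan]
    split_ifs with h1 h2 h3
    · simpa using ih _ _
    · simpa using ih _ _
    · simp at h3
    · simpa using ih _ _
lemma pvFold_eq_scan : ∀ (ts : List String) (s p v : Bool) (m : Int) (rem : List String),
    ts.foldl pvStepB (s, p, v, m, rem) =
      (s || (pvScan ts s p v).2.1, p || (pvScan ts s p v).2.2.1,
       v || (pvScan ts s p v).2.2.2.isSome,
       (match (pvScan ts s p v).2.2.2 with
        | some t => pvParseVotes t m
        | none => m),
       rem ++ (pvScan ts s p v).1) := by
  intro ts
  induction ts with
  | nil => intro s p v m rem; simp [pvScan]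
  | cons t ts ih =>
    intro s p v m rem
    simp only [List.foldl_cons, pvStepB, pvScan]
    split_ifs with h1 h2 h3
    · simp at h1; rw [ih]; simp [h1.1, pvScan_s_true]
    · simp at h2; rw [ih]; simp [h2.1, pvScan_p_true]
    · simp at h3; rw [ih]; simp [h3.1, pvScan_v_true]
    · rw [ih]; simp
lemma pvScan_secret_none : ∀ (ts : List String) (p v : Bool),
    PySem.List.index? ts "secret" = none → pvScan ts false p v = pvScan ts true p v := by
  intro ts
  induction ts with
  | nil => intro p v _; rfl
  | cons t ts ih =>
    intro p v h
    have ht : t ≠ "secret" := by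
      intro he; rw [he, PySem.List.index?_cons_self] at h; exact Option.some_ne_none _ h
    rw [PySem.List.index?_cons_of_ne ts ht] at h
    have h' : PySem.List.index? ts "secret" = none := Option.map_eq_none_iff.mp h
    simp only [pvScan, Bool.not_true, Bool.not_false, Bool.false_and, Bool.true_and,
      beq_iff_eq, ht, if_false]
    split_ifs <;> simp_all [ih _ _ h']
lemma pvScan_secret_some : ∀ (ts : List String) (p v : Bool) (i : Nat),
    PySem.List.index? ts "secret" = some i →
    pvScan ts false p v =
      ((pvScan (ts.eraseIdx i) true p v).1, true,
       (pvScan (ts.eraseIdx i) true p v).2.2.1, (pvScan (ts.eraseIdx i) true p v).2.2.2) := by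
  intro ts
  induction ts with
  | nil => intro p v i h; simp [PySem.List.index?] at h
  | cons t ts ih =>
    intro p v i h
    by_cases ht : t = "secret"
    · subst ht
      rw [PySem.List.index?_cons_self] at h
      cases h
      simp [pvScan]
    · rw [PySem.List.index?_cons_of_ne ts ht] at h
      rcases Option.map_eq_some_iff.mp h with ⟨j, hj, rfl⟩
      simp only [pvScan, Bool.not_false, Bool.true_and, beq_iff_eq, ht, if_false,
        List.eraseIdx_cons_succ]
      split_ifs <;> simp_all [ih _ _ _ hj]
lemma pvScan_public_none : ∀ (ts : List String) (s v : Bool),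
    PySem.List.index? ts "public" = none → pvScan ts s false v = pvScan ts s true v := by
  intro ts
  induction ts with
  | nil => intro s v _; rfl
  | cons t ts ih =>
    intro s v h
    have ht : t ≠ "public" := by
      intro he; rw [he, PySem.List.index?_cons_self] at h; exact Option.some_ne_none _ h
    rw [PySem.List.index?_cons_of_ne ts ht] at h
    have h' : PySem.List.index? ts "public" = none := Option.map_eq_none_iff.mp h
    simp only [pvScan, Bool.not_true, Bool.not_false, Bool.false_and, Bool.true_and,
      beq_iff_eq, ht, if_false]
    split_ifs <;> simp_all [ih _ _ h']
lemma pvScan_public_some : ∀ (ts : List String) (s v : Bool) (i : Nat),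
    PySem.List.index? ts "public" = some i →
    pvScan ts s false v =
      ((pvScan (ts.eraseIdx i) s true v).1, (pvScan (ts.eraseIdx i) s true v).2.1,
       true, (pvScan (ts.eraseIdx i) s true v).2.2.2) := by
  intro ts
  induction ts with
  | nil => intro s v i h; simp [PySem.List.index?] at h
  | cons t ts ih =>
    intro s v i h
    by_cases ht : t = "public"
    · subst ht
      rw [PySem.List.index?_cons_self] at h
      cases h
      simp only [pvScan, List.eraseIdx_zero, List.tail_cons, beq_iff_eq,
        Bool.not_false, Bool.true_and]
      split_ifs <;> simp_all
    · rw [PySem.List.index?_cons_of_ne ts ht] at h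
      rcases Option.map_eq_some_iff.mp h with ⟨j, hj, rfl⟩
      simp only [pvScan, Bool.not_false, Bool.true_and, beq_iff_eq, ht, if_false,
        List.eraseIdx_cons_succ]
      split_ifs <;> simp_all [ih _ _ _ hj]
lemma pvScan_votes_none : ∀ (ts : List String) (s p : Bool),
    pvFirstV ts = none → pvScan ts s p false = pvScan ts s p true := by
  intro ts
  induction ts with
  | nil => intro s p _; rfl
  | cons t ts ih =>
    intro s p h
    simp only [pvFirstV] at h
    split_ifs at h with hv
    have h' : pvFirstV ts = none := Option.map_eq_none_iff.mp h
    simp only [pvScan, hv]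
    split_ifs <;> simp_all [ih _ _ h']
lemma pvScan_votes_some : ∀ (ts : List String) (s p : Bool) (i : Nat) (t : String),
    pvFirstV ts = some (i, t) →
    pvScan ts s p false =
      ((pvScan (ts.eraseIdx i) s p true).1, (pvScan (ts.eraseIdx i) s p true).2.1,
       (pvScan (ts.eraseIdx i) s p true).2.2.1, some t) := by
  intro ts
  induction ts with
  | nil => intro s p i t h; simp [pvFirstV] at h
  | cons u ts ih =>
    intro s p i t h
    simp only [pvFirstV] at h
    split_ifs at h with hv
    · cases h
      have hs : u ≠ "secret" := by
        rintro rfl; revert hv; decide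
      have hp : u ≠ "public" := by
        rintro rfl; revert hv; decide
      simp only [pvScan, List.eraseIdx_zero, List.tail_cons, hv, Bool.and_true,
        Bool.not_false]
      split_ifs <;> simp_all
    · rcases Option.map_eq_some_iff.mp h with ⟨⟨j, t'⟩, hj, he⟩
      cases he
      simp only [pvScan, hv, List.eraseIdx_cons_succ]
      split_ifs <;> simp_all [ih _ _ _ _ hj]
lemma pvScan_all_true : ∀ (ts : List String),
    pvScan ts true true true = (ts, false, false, none) := by
  intro ts
  induction ts with
  | nil => rfl
  | cons t ts ih => simp [pvScan, ih]
lemma pvFirstV_lt : ∀ (ts : List String) (i : Nat) (t : String),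
    pvFirstV ts = some (i, t) → i < ts.length := by
  intro ts
  induction ts with
  | nil => intro i t h; simp [pvFirstV] at h
  | cons u ts ih =>
    intro i t h
    simp only [pvFirstV] at h
    split_ifs at h with hv
    · cases h; simp
    · rcases Option.map_eq_some_iff.mp h with ⟨⟨j, t'⟩, hj, he⟩
      cases he
      exact Nat.succ_lt_succ (ih _ _ hj)
lemma pvEnumFilter_head : ∀ (ts : List String) (a : Int),
    ((PySem.List.enumerate ts a).filter
        (fun q => PySem.Str.isIn "votes" (PySem.Str.lower q.2))).head? =
      (pvFirstV ts).map (fun q => (a + (q.1 : Int), q.2)) := by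
  intro ts
  induction ts with
  | nil => intro a; simp [PySem.List.enumerate_nil, pvFirstV]
  | cons t ts ih =>
    intro a
    rw [PySem.List.enumerate_cons]
    by_cases hv : PySem.Str.isIn "votes" (PySem.Str.lower t) = true
    · rw [List.filter_cons_of_pos (by simpa using hv)]
      simp only [pvFirstV, hv, if_true, List.head?_cons, Option.map_some]
      norm_num
    · rw [List.filter_cons_of_neg (by simpa using hv)]
      rw [ih (a + 1)]
      simp only [pvFirstV, hv]
      cases h : pvFirstV ts with
      | none => simp
      | some q => simp; omega
lemma pvIndex?_lt {xs : List String} {v : String} {i : Nat}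
    (h : PySem.List.index? xs v = some i) : i < xs.length := by
  rcases PySem.List.getElem_of_index?_eq_some h with ⟨hk, _⟩
  exact hk
lemma pvMain : ∀ (command : String), parse_slash_command command = parse_slash_command_alt command := by
  intro command
  unfold parse_slash_command parse_slash_command_alt
  set toks := ((PySem.Str.split? command "--").getD []).map PySem.Str.strip with htoks
  clear_value toks
  simp only [pvFold_eq_scan, Bool.false_or, List.nil_append]
  cases hs : PySem.List.index? toks "secret" with
  | some i =>
    rw [pvScan_secret_some _ _ _ _ hs]
    simp only
    rw [PySem.List.pop?_natCast toks i (pvIndex?_lt hs)]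
    simp only
    cases hp : PySem.List.index? (toks.eraseIdx i) "public" with
    | some j =>
      rw [pvScan_public_some _ _ _ _ hp]
      simp only
      rw [PySem.List.pop?_natCast _ j (pvIndex?_lt hp)]
      simp only
      rw [pvEnumFilter_head]
      cases hv : pvFirstV ((toks.eraseIdx i).eraseIdx j) with
      | some q =>
        obtain ⟨k, t⟩ := q
        simp only [Option.map_some, zero_add]
        rw [pvScan_votes_some _ _ _ _ _ hv]
        simp only
        rw [PySem.List.pop?_natCast _ k (pvFirstV_lt _ _ _ hv)]
        simp only
        rw [pvScan_all_true]
        simp only [pvParseVotes]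
        cases hgx : PySem.List.pyGet? ((PySem.Str.split? t "=").getD []) 1 with
        | none => cases ((toks.eraseIdx i).eraseIdx j).eraseIdx k <;> simp
        | some x =>
          cases hox : PySem.Int.ofStr? x with
          | none => cases ((toks.eraseIdx i).eraseIdx j).eraseIdx k <;> simp [hox]
          | some n => cases ((toks.eraseIdx i).eraseIdx j).eraseIdx k <;> simp [hox]
      | none =>
        simp only [Option.map_none]
        rw [pvScan_votes_none _ _ _ hv, pvScan_all_true]
    | none =>
      rw [pvScan_public_none _ _ _ hp]
      simp only
      rw [pvEnumFilter_head]
      cases hv : pvFirstV (toks.eraseIdx i) with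
      | some q =>
        obtain ⟨k, t⟩ := q
        simp only [Option.map_some, zero_add]
        rw [pvScan_votes_some _ _ _ _ _ hv]
        simp only
        rw [PySem.List.pop?_natCast _ k (pvFirstV_lt _ _ _ hv)]
        simp only
        rw [pvScan_all_true]
        simp only [pvParseVotes]
        cases hgx : PySem.List.pyGet? ((PySem.Str.split? t "=").getD []) 1 with
        | none => cases (toks.eraseIdx i).eraseIdx k <;> simp
        | some x =>
          cases hox : PySem.Int.ofStr? x with
          | none => cases (toks.eraseIdx i).eraseIdx k <;> simp [hox]
          | some n => cases (toks.eraseIdx i).eraseIdx k <;> simp [hox]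
      | none =>
        simp only [Option.map_none]
        rw [pvScan_votes_none _ _ _ hv, pvScan_all_true]
  | none =>
    rw [pvScan_secret_none _ _ _ hs]
    simp only
    cases hp : PySem.List.index? toks "public" with
    | some j =>
      rw [pvScan_public_some _ _ _ _ hp]
      simp only
      rw [PySem.List.pop?_natCast _ j (pvIndex?_lt hp)]
      simp only
      rw [pvEnumFilter_head]
      cases hv : pvFirstV (toks.eraseIdx j) with
      | some q =>
        obtain ⟨k, t⟩ := q
        simp only [Option.map_some, zero_add]
        rw [pvScan_votes_some _ _ _ _ _ hv]
        simp only
        rw [PySem.List.pop?_natCast _ k (pvFirstV_lt _ _ _ hv)]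
        simp only
        rw [pvScan_all_true]
        simp only [pvParseVotes]
        cases hgx : PySem.List.pyGet? ((PySem.Str.split? t "=").getD []) 1 with
        | none => cases (toks.eraseIdx j).eraseIdx k <;> simp
        | some x =>
          cases hox : PySem.Int.ofStr? x with
          | none => cases (toks.eraseIdx j).eraseIdx k <;> simp [hox]
          | some n => cases (toks.eraseIdx j).eraseIdx k <;> simp [hox]
      | none =>
        simp only [Option.map_none]
        rw [pvScan_votes_none _ _ _ hv, pvScan_all_true]
    | none =>
      rw [pvScan_public_none _ _ _ hp]
      simp only
      rw [pvEnumFilter_head]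
      cases hv : pvFirstV (toks) with
      | some q =>
        obtain ⟨k, t⟩ := q
        simp only [Option.map_some, zero_add]
        rw [pvScan_votes_some _ _ _ _ _ hv]
        simp only
        rw [PySem.List.pop?_natCast _ k (pvFirstV_lt _ _ _ hv)]
        simp only
        rw [pvScan_all_true]
        simp only [pvParseVotes]
        cases hgx : PySem.List.pyGet? ((PySem.Str.split? t "=").getD []) 1 with
        | none => cases (toks).eraseIdx k <;> simp
        | some x =>
          cases hox : PySem.Int.ofStr? x with
          | none => cases (toks).eraseIdx k <;> simp [hox]
          | some n => cases (toks).eraseIdx k <;> simp [hox]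
      | none =>
        simp only [Option.map_none]
        rw [pvScan_votes_none _ _ _ hv, pvScan_all_true]

-- ===== VERDICT (by name: the statement is the Claim_ definition above) =====
theorem parse_slash_command_spec : Claim_equal_parse_slash_command := by
  intro command _
  unfold Spec_parse_slash_command
  exact pvMain command
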